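-- pv_equiv track=rewrite | github.com/hsreedeth/MAIP | src/rag_translate_rules.py | extract_rules_by_label
-- ===== SOURCE A (Python) =====
-- from collections import defaultdict
--
-- def extract_rules_by_label(rules: list[dict]) -> dict[str, list[dict]]:
--     by_label: dict[str, list[dict]] = defaultdict(list)
--     for r in rules:
--         lbl = r.get("outcome")
--         if lbl is None:
--             continue
--         by_label[str(lbl)].append(r)
--     return by_label
-- ===== SOURCE B (Python) =====
-- from collections import defaultdict
--
-- def extract_rules_by_label(rules: list[dict]) -> dict[str, list[dict]]:
--     # Pass 1: distinct outcome labels in first-occurrence order.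
--     labels = []
--     seen = set()
--     for r in rules:
--         lbl = r.get("outcome")
--         if lbl is not None:
--             s = str(lbl)
--             if s not in seen:
--                 seen.add(s)
--                 labels.append(s)
--     # Pass 2: one filtering scan per label.
--     out = defaultdict(list)
--     for s in labels:
--         out[s] = [r for r in rules if r.get("outcome") is not None and str(r.get("outcome")) == s]
--     return out
-- ===== Notes on version B (the rewrite author's own statement) =====
-- stated objective: alternative
-- what changed: A buckets rules into a defaultdict in a single pass; B first collects the distinct outcome labels in first-occurrence order and then builds each group by a separate filtering scan over the input.
import Mathlib
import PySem

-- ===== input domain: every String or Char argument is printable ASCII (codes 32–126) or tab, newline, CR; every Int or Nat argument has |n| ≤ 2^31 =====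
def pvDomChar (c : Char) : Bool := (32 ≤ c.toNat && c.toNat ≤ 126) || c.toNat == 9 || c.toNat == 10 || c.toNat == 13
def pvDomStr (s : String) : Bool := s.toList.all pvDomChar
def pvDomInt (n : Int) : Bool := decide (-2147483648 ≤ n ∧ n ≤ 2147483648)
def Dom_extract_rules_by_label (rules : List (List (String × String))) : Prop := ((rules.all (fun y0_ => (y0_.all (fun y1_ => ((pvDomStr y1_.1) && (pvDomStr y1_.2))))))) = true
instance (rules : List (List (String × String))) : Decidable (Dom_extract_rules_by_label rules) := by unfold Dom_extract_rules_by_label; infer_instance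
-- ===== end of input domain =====

-- B replaces A's one-pass defaultdict bucketing by a labels-then-filter two-pass pipeline (alternative decomposition, not faster).
-- Values of these str->str dicts are strings, so Python's str(lbl) is lbl itself.

-- ===== PORT A =====
-- r.get("outcome")
def pvOutcome (r : List (String × String)) : Option String :=
  PySem.Dict.get? (PySem.Dict.mk r) "outcome"

def extract_rules_by_label (rules : List (List (String × String))) : List (String × List (List (String × String))) :=
  -- by_label = defaultdict(list); for r: skip None, by_label[str(lbl)].append(r)
  (rules.foldl (fun (d : PySem.Dict String (List (List (String × String)))) r =>
      match pvOutcome r with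
      | none => d
      | some lbl => d.modify lbl [] (fun g => g ++ [r])) PySem.Dict.empty).items

-- ===== PORT B =====
def extract_rules_by_label_alt (rules : List (List (String × String))) : List (String × List (List (String × String))) :=
  -- pass 1: distinct labels in first-occurrence order (seen set + labels list = PySem.Set)
  let labels : PySem.Set String := rules.foldl (fun s r =>
      match pvOutcome r with
      | none => s
      | some lbl => PySem.Set.add s lbl) PySem.Set.empty
  -- pass 2: out[s] = [r for r in rules if …]
  (labels.foldl (fun (d : PySem.Dict String (List (List (String × String)))) s =>
      d.insert s (rules.filter (fun r =>
        match pvOutcome r with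
        | some l => l == s
        | none => false))) PySem.Dict.empty).items

-- ===== PRECONDITION & SPEC =====
def Spec_extract_rules_by_label (rules : List (List (String × String))) (out : List (String × List (List (String × String)))) : Prop := out = extract_rules_by_label_alt rules
instance (rules : List (List (String × String))) (out : List (String × List (List (String × String)))) : Decidable (Spec_extract_rules_by_label rules out) := by unfold Spec_extract_rules_by_label; infer_instance

-- ===== CLAIM (what is proved, stated in full; the proofs are below) =====
def Claim_equal_extract_rules_by_label : Prop := ∀ (rules : List (List (String × String))), Dom_extract_rules_by_label rules → Spec_extract_rules_by_label rules (extract_rules_by_label rules)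

-- ===== LEMMAS AND PROOFS =====

-- the (label, rule) pairs A actually processes, in order
def pvPairs (rules : List (List (String × String))) : List (String × List (String × String)) :=
  rules.filterMap (fun r => (pvOutcome r).map (fun l => (l, r)))

theorem pvPairs_cons (r : List (String × String)) (rs : List (List (String × String))) :
    pvPairs (r :: rs) = (match pvOutcome r with
      | none => pvPairs rs
      | some l => (l, r) :: pvPairs rs) := by
  cases h : pvOutcome r <;> simp [pvPairs, h]

-- A's loop over rules is the modify-loop over pvPairs
theorem A_fold_eq (rules : List (List (String × String)))
    (d : PySem.Dict String (List (List (String × String)))) :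
    rules.foldl (fun d r =>
      match pvOutcome r with
      | none => d
      | some lbl => d.modify lbl [] (fun g => g ++ [r])) d
    = (pvPairs rules).foldl (fun d p => d.modify p.1 [] (fun g => g ++ [p.2])) d := by
  induction rules generalizing d with
  | nil => rfl
  | cons r rs ih =>
    rw [pvPairs_cons]
    cases h : pvOutcome r <;> simp [h, ih]

-- B's first pass is Set.ofList of the labels of pvPairs
theorem B_labels_eq (rules : List (List (String × String))) (s : PySem.Set String) :
    rules.foldl (fun s r =>
      match pvOutcome r with
      | none => s
      | some lbl => PySem.Set.add s lbl) s
    = PySem.Set.update s ((pvPairs rules).map Prod.fst) := by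
  induction rules generalizing s with
  | nil => rfl
  | cons r rs ih =>
    rw [pvPairs_cons]
    cases h : pvOutcome r <;> simp [h, ih, PySem.Set.update_cons]

-- the group of label c, read off from pvPairs, is B's filter
theorem pairs_filter_eq (rules : List (List (String × String))) (c : String) :
    ((pvPairs rules).filter (fun p => p.1 == c)).map (·.2)
    = rules.filter (fun r =>
        match pvOutcome r with
        | some l => l == c
        | none => false) := by
  induction rules with
  | nil => rfl
  | cons r rs ih =>
    rw [pvPairs_cons]
    cases h : pvOutcome r with
    | none => simp [h, ih]
    | some l =>
      by_cases hc : l == c <;> simp [h, hc, ih]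

theorem extract_rules_by_label_eq (rules : List (List (String × String))) :
    extract_rules_by_label rules = extract_rules_by_label_alt rules := by
  unfold extract_rules_by_label extract_rules_by_label_alt
  rw [A_fold_eq, B_labels_eq]
  set L := (pvPairs rules).map Prod.fst with hL
  have hlab : PySem.Set.update PySem.Set.empty L = PySem.Set.ofList L :=
    PySem.Set.update_nil_left L
  rw [hlab]
  have hnodup : (PySem.Set.ofList L).Nodup := PySem.Set.nodup_ofList L
  -- B side: fresh distinct inserts append
  rw [PySem.Dict.items_foldl_insert_fresh
        (k := fun s => s)
        (v := fun s => rules.filter (fun r =>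
          match pvOutcome r with
          | some l => l == s
          | none => false))
        (l := PySem.Set.ofList L) (d := PySem.Dict.empty)
        (by intro a _; exact PySem.Dict.contains_empty a)
        (by simp)]
  -- A side: items = keys.map (k, getD k [])
  have hkeysNodup :
      ((pvPairs rules).foldl (fun d p => d.modify p.1 [] (fun g => g ++ [p.2]))
        (PySem.Dict.empty : PySem.Dict String (List (List (String × String))))).keys.Nodup := by
    exact PySem.Dict.nodup_keys_foldl_modify_key _ _ _ _ _ (by simp [PySem.Dict.keys_empty])
  have hkeys :
      ((pvPairs rules).foldl (fun d p => d.modify p.1 [] (fun g => g ++ [p.2]))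
        (PySem.Dict.empty : PySem.Dict String (List (List (String × String))))).keys
      = PySem.Set.ofList L := by
    rw [PySem.Dict.keys_foldl_modify_key]
    rw [hL]; rfl
  rw [PySem.Dict.items_eq_map_keys _ hkeysNodup [], hkeys]
  refine List.map_congr_left ?_
  intro c hc
  rw [PySem.Dict.getD_foldl_modify_append]
  simp [PySem.Dict.getD_empty, pairs_filter_eq]

-- ===== VERDICT (by name: the statement is the Claim_ definition above) =====
theorem extract_rules_by_label_spec : Claim_equal_extract_rules_by_label := by
  intro rules _
  unfold Spec_extract_rules_by_label
  exact extract_rules_by_label_eq rules
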